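-- pv_equiv track=rewrite | github.com/monkeylyf/interviewjam | sort/leetcode_Wiggle_Sort_II.py | is_wiggle
-- ===== SOURCE A (Python) =====
-- def is_wiggle(nums):
--     n = len(nums)
--     if n < 2:
--         return True
--
--     i = 1
--
--     while i < n:
--         if nums[i - 1] >= nums[i] or (i + 1 < n and nums[i] <= nums[i + 1]):
--             return False
--         i += 2
--     return True
-- ===== SOURCE B (Python) =====
-- def is_wiggle(nums):
--     up = True
--     prev = None
--     for x in nums:
--         if prev is not None:
--             if (prev >= x) if up else (prev <= x):
--                 return False
--             up = not up
--         prev = x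
--     return True
-- ===== Notes on version B (the rewrite author's own statement) =====
-- stated objective: alternative
-- what changed: Replaces the index-based stride-2 while loop that checks two comparisons per step with a single element-wise scan carrying the previous element and an alternating up/down flag.
import Mathlib
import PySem

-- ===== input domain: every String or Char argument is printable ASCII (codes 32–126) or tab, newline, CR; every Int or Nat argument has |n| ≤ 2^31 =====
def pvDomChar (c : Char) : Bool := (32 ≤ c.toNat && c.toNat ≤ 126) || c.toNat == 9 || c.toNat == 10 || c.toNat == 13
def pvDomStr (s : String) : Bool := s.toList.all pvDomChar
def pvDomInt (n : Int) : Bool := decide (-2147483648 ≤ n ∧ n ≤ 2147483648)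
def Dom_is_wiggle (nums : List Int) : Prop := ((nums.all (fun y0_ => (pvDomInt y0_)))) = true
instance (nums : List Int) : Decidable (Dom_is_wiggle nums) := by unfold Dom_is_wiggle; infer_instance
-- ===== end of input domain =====

-- B replaces A's stride-2 indexed while loop (two comparisons per step) with a single
-- element-wise scan carrying the previous element and an alternating up/down flag.

-- ===== PORT A =====
-- the while loop of A: i starts at 1, steps by 2; all indices used (i-1, i, i+1) are
-- in range exactly when guarded, so List.getD equals Python's nums[...] here
def isWiggleGoA (nums : List Int) (n i : Nat) : Bool :=
  if h : i < n then
    if decide (nums.getD (i - 1) 0 ≥ nums.getD i 0) ||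
       (decide (i + 1 < n) && decide (nums.getD i 0 ≤ nums.getD (i + 1) 0)) then
      false
    else
      isWiggleGoA nums n (i + 2)
  else
    true
termination_by n - i
decreasing_by omega

def is_wiggle (nums : List Int) : Bool :=
  let n := nums.length
  if n < 2 then true
  else isWiggleGoA nums n 1

-- ===== PORT B =====
-- the for loop of B: state (prev, up); none = no previous element yet
def isWiggleGoB : List Int → Option Int × Bool → Bool
  | [], _ => true
  | x :: rest, (prev, up) =>
    match prev with
    | none => isWiggleGoB rest (some x, up)
    | some p =>
      if (if up then decide (p ≥ x) else decide (p ≤ x)) then false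
      else isWiggleGoB rest (some x, !up)

def is_wiggle_alt (nums : List Int) : Bool :=
  isWiggleGoB nums (none, true)

-- ===== PRECONDITION & SPEC =====
def Spec_is_wiggle (nums : List Int) (out : Bool) : Prop := out = is_wiggle_alt nums
instance (nums : List Int) (out : Bool) : Decidable (Spec_is_wiggle nums out) := by unfold Spec_is_wiggle; infer_instance

-- ===== CLAIM (what is proved, stated in full; the proofs are below) =====
def Claim_equal_is_wiggle : Prop := ∀ (nums : List Int), Dom_is_wiggle nums → Spec_is_wiggle nums (is_wiggle nums)

-- ===== LEMMAS AND PROOFS =====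

-- common middle form: A's chain of checks, expressed structurally on the list
def aChain : List Int → Bool
  | a :: b :: rest =>
    if decide (a ≥ b) || (match rest with | c :: _ => decide (b ≤ c) | [] => false) then false
    else aChain rest
  | _ => true

theorem aChain_short (l : List Int) (h : l.length ≤ 1) : aChain l = true := by
  match l with
  | [] => rfl
  | [x] => rfl
  | a :: b :: r => simp at h

-- A's indexed loop computes aChain of the suffix it has not yet inspected
theorem goA_eq (nums : List Int) (i : Nat) (h1 : 1 ≤ i) :
    isWiggleGoA nums nums.length i = aChain (nums.drop (i - 1)) := by
  rw [isWiggleGoA]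
  by_cases h : i < nums.length
  · have hi1 : i - 1 < nums.length := by omega
    have e1 : nums.drop (i - 1) = nums[i - 1] :: nums.drop (i - 1 + 1) :=
      List.drop_eq_getElem_cons hi1
    have hii : i - 1 + 1 = i := by omega
    have e2 : nums.drop i = nums[i] :: nums.drop (i + 1) :=
      List.drop_eq_getElem_cons h
    have ga : nums.getD (i - 1) 0 = nums[i - 1] := List.getD_eq_getElem _ _ hi1
    have gb : nums.getD i 0 = nums[i] := List.getD_eq_getElem _ _ h
    have ih := goA_eq nums (i + 2) (by omega)
    have hdrop : nums.drop (i + 2 - 1) = nums.drop (i + 1) := by norm_num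
    rw [hdrop] at ih
    rw [e1, hii, e2]
    simp only [h, dif_pos, ga, gb]
    by_cases hc : i + 1 < nums.length
    · have e3 : nums.drop (i + 1) = nums[i + 1] :: nums.drop (i + 2) :=
        List.drop_eq_getElem_cons hc
      have gc : nums.getD (i + 1) 0 = nums[i + 1] := List.getD_eq_getElem _ _ hc
      rw [gc, e3, aChain]
      simp only [hc, decide_true, Bool.true_and]
      by_cases h1 : nums[i - 1] ≥ nums[i] <;> by_cases h2 : nums[i] ≤ nums[i + 1] <;>
        simp [h1, h2, ← e3, ih]
    · have e3 : nums.drop (i + 1) = ([] : List Int) := by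
        apply List.drop_eq_nil_of_le; omega
      rw [e3, aChain]
      simp only [hc, decide_false, Bool.false_and, Bool.or_false]
      by_cases h1 : nums[i - 1] ≥ nums[i] <;> simp [h1, ih, e3]
  · simp only [h, dif_neg, not_false_eq_true]
    have hl : (nums.drop (i - 1)).length ≤ 1 := by
      rw [List.length_drop]; omega
    exact (aChain_short _ hl).symm
termination_by nums.length - i
decreasing_by omega

-- B's scan, once it holds a previous element, also computes aChain
theorem goB_eq (l : List Int) (p : Int) : isWiggleGoB l (some p, true) = aChain (p :: l) := by
  match l with
  | [] => rfl
  | [b] =>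
    simp only [isWiggleGoB, aChain]
    by_cases h : p ≥ b <;> simp [h]
  | b :: c :: rest =>
    have ih := goB_eq rest c
    simp only [isWiggleGoB, aChain]
    by_cases h1 : p ≥ b <;> by_cases h2 : b ≤ c <;>
      simp [h1, h2, ih]
termination_by l.length

theorem both_eq_aChain (nums : List Int) : is_wiggle nums = aChain nums ∧ is_wiggle_alt nums = aChain nums := by
  constructor
  · unfold is_wiggle
    by_cases h : nums.length < 2
    · simp only [h, if_pos]
      exact (aChain_short nums (by omega)).symm
    · simp only [h, if_neg, not_false_eq_true]
      have := goA_eq nums 1 (le_refl 1)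
      simpa using this
  · unfold is_wiggle_alt
    match nums with
    | [] => rfl
    | p :: l =>
      simp only [isWiggleGoB]
      exact goB_eq l p

-- ===== VERDICT (by name: the statement is the Claim_ definition above) =====
theorem is_wiggle_spec : Claim_equal_is_wiggle := by
  intro nums _
  unfold Spec_is_wiggle
  obtain ⟨ha, hb⟩ := both_eq_aChain nums
  rw [ha, hb]
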